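-- pv_equiv track=rewrite | github.com/OlhaNoda/Python_course_for_beginners | 2021_02/lesson22_130221/Shift_digits.py | count_place
-- ===== SOURCE A (Python) =====
-- def count_place(number: int) -> int:
--     if not isinstance(number, int):
--         raise TypeError(f'This function {count_place.__name__} works only with number: int')
--     place = 1
--     while number >= 10:
--         number //= 10
--         place *= 10
--     return place
-- ===== SOURCE B (Python) =====
-- def count_place(number: int) -> int:
--     if not isinstance(number, int):
--         raise TypeError(f'This function {count_place.__name__} works only with number: int')
--     if number < 10:
--         return 1
--     return 10 ** (len(str(number)) - 1)
-- ===== Notes on version B (the rewrite author's own statement) =====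
-- stated objective: simpler
-- what changed: Replaces the digit-stripping while loop with a closed form: return 1 for number < 10, otherwise 10 raised to (decimal digit count - 1) computed via len(str(number)).
import Mathlib
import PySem

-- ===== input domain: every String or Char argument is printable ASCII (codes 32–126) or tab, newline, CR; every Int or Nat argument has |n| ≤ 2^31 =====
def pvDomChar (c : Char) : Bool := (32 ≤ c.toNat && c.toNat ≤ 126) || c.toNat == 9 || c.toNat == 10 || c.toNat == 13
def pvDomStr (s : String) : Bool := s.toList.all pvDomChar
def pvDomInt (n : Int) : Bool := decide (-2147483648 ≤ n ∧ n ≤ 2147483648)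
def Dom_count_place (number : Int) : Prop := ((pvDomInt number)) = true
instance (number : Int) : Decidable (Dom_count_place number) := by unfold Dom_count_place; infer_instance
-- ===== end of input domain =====

-- B replaces A's digit-stripping while loop with the closed form 10^(digit count - 1); objective: simpler.

-- ===== PORT A =====
-- the while loop: state (number, place), repeats while number >= 10
def count_place_go (number place : Int) : Int :=
  if h : 10 ≤ number then
    count_place_go (PySem.Int.floordiv number 10) (place * 10)
  else place
termination_by number.toNat
decreasing_by
  have : PySem.Int.floordiv number 10 = number / 10 :=
    PySem.Int.floordiv_eq_ediv_of_pos (by omega)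
  rw [this]
  omega

def count_place (number : Int) : Int := count_place_go number 1

-- ===== PORT B =====
def count_place_alt (number : Int) : Int :=
  if number < 10 then 1
  else 10 ^ ((PySem.Str.len (PySem.Int.toStr number) - 1).toNat)

-- ===== PRECONDITION & SPEC =====
def Spec_count_place (number : Int) (out : Int) : Prop := out = count_place_alt number
instance (number : Int) (out : Int) : Decidable (Spec_count_place number out) := by unfold Spec_count_place; infer_instance

-- ===== CLAIM (what is proved, stated in full; the proofs are below) =====
def Claim_equal_count_place : Prop := ∀ (number : Int), Dom_count_place number → Spec_count_place number (count_place number)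

-- ===== LEMMAS AND PROOFS =====

-- exact length of Nat.toDigits in base 10: log₁₀ n + 1 (Mathlib only has the upper bound)
lemma toDigitsCore_ten_length (f : Nat) : ∀ (n : Nat), 1 ≤ f → n < 10 ^ f →
    (Nat.toDigitsCore 10 f n []).length = Nat.log 10 n + 1 := by
  induction f with
  | zero => intro n hf; omega
  | succ f ih =>
    intro n _ hn
    rw [Nat.toDigitsCore]
    by_cases hx : n / 10 = 0
    · have hlt : n < 10 := by omega
      simp [hx, Nat.log_eq_zero_iff.2 (Or.inl hlt)]
    · have h10 : 10 ≤ n := by omega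
      have hf : 1 ≤ f := by
        by_contra hc
        have : f = 0 := by omega
        subst this
        simp at hn
        omega
      have hdiv : n / 10 < 10 ^ f := by
        apply Nat.div_lt_of_lt_mul
        calc n < 10 ^ (f + 1) := hn
          _ = 10 * 10 ^ f := by ring
      rw [if_neg hx, Nat.toDigitsCore_lens_eq, ih (n / 10) hf hdiv,
        Nat.log_of_one_lt_of_le (by norm_num) h10]

lemma toDigits_ten_length (n : Nat) :
    (Nat.toDigits 10 n).length = Nat.log 10 n + 1 := by
  have h1 : n < 10 ^ (n + 1) := by
    calc n < 10 ^ n := Nat.lt_pow_self (by norm_num)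
      _ ≤ 10 ^ (n + 1) := Nat.pow_le_pow_right (by norm_num) (by omega)
  exact toDigitsCore_ten_length (n + 1) n (by omega) h1

-- the loop computes place * 10 ^ log₁₀ number
lemma count_place_go_eq (n : Nat) : ∀ (number place : Int), number.toNat = n →
    count_place_go number place = place * 10 ^ Nat.log 10 number.toNat := by
  induction n using Nat.strong_induction_on with
  | _ n ih =>
    intro number place hn
    rw [count_place_go]
    by_cases h : 10 ≤ number
    · have hfd : PySem.Int.floordiv number 10 = number / 10 :=
        PySem.Int.floordiv_eq_ediv_of_pos (by omega)
      have hlt : (number / 10).toNat < n := by omega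
      have hE : (number / 10).toNat = number.toNat / 10 := by omega
      have hlog : Nat.log 10 number.toNat
          = Nat.log 10 (number / 10).toNat + 1 := by
        have h10 : (10 : Nat) ≤ number.toNat := by omega
        rw [Nat.log_of_one_lt_of_le (by norm_num) h10, hE]
      simp only [h, dif_pos, hfd]
      rw [ih (number / 10).toNat hlt (number / 10) (place * 10) rfl, hlog]
      ring
    · have : Nat.log 10 number.toNat = 0 :=
        Nat.log_eq_zero_iff.2 (Or.inl (by omega))
      simp [h, this]

theorem count_place_eq_alt (number : Int) :
    count_place number = count_place_alt number := by
  unfold count_place count_place_alt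
  rw [count_place_go_eq number.toNat number 1 rfl, one_mul]
  by_cases h : number < 10
  · simp [h, Nat.log_eq_zero_iff.2 (Or.inl (show number.toNat < 10 by omega))]
  · have hneg : ¬ number < 0 := by omega
    rw [if_neg h, PySem.Str.len_eq, PySem.Int.toList_toStr]
    unfold PySem.Int.toChars
    rw [if_neg hneg, toDigits_ten_length]
    congr 1
    omega

-- ===== VERDICT (by name: the statement is the Claim_ definition above) =====
theorem count_place_spec : Claim_equal_count_place := by
  intro number _
  exact count_place_eq_alt number
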